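-- pv_equiv track=rewrite | github.com/hahanbyul/algorithm_study | 2017-09-3W/expression.py | get_initial_array
-- ===== SOURCE A (Python) =====
-- def get_initial_array(goal):
--     i = 1
--     summed = 0
--     array = []
--
--     while summed < goal:
--         array.append(i)
--         summed += i
--         i += 1
--
--     return array, summed
-- ===== SOURCE B (Python) =====
-- def get_initial_array(goal):
--     lo, hi = 0, max(goal, 0)
--     while lo < hi:
--         mid = (lo + hi) // 2
--         if mid * (mid + 1) // 2 >= goal:
--             hi = mid
--         else:
--             lo = mid + 1
--     return list(range(1, lo + 1)), lo * (lo + 1) // 2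
-- ===== Notes on version B (the rewrite author's own statement) =====
-- stated objective: alternative
-- what changed: Replaces A's step-by-step accumulation loop (append, add, test) with a binary search for the smallest n whose triangular number reaches goal, then builds the list of the first n positive integers and the closed-form triangular sum.
import Mathlib
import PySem

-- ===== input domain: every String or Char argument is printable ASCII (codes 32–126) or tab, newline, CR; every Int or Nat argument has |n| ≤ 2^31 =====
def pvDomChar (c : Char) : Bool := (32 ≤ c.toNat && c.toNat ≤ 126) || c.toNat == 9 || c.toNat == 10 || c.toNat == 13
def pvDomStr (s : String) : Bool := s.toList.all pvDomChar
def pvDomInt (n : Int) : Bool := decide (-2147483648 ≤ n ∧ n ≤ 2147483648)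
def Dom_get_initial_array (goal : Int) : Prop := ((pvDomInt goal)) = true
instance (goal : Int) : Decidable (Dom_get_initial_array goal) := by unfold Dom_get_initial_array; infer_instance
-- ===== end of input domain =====

-- B replaces A's step-by-step triangular accumulation by a binary search for the
-- smallest n with n*(n+1)//2 >= goal, then builds range(1, n+1) and the closed-form sum
-- (objective: alternative algorithm; the list construction still costs O(n)).

-- ===== PORT A =====
-- A's while loop: i starts at 1 and only increases, so goal - summed strictly decreases.
def aLoop (goal i summed : Int) (array : List Int) (h : 1 ≤ i) : List Int × Int :=
  if hlt : summed < goal then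
    aLoop goal (i + 1) (summed + i) (array ++ [i]) (by omega)
  else
    (array, summed)
termination_by (goal - summed).toNat
decreasing_by omega

def get_initial_array (goal : Int) : List Int × Int :=
  aLoop goal 1 0 [] (by norm_num)

-- ===== PORT B =====
-- binary search for the smallest lo with lo*(lo+1)//2 >= goal
def bLoop (goal lo hi : Int) : Int :=
  if h : lo < hi then
    let mid := PySem.Int.floordiv (lo + hi) 2
    if PySem.Int.floordiv (mid * (mid + 1)) 2 ≥ goal then
      bLoop goal lo mid
    else
      bLoop goal (mid + 1) hi
  else
    lo
termination_by (hi - lo).toNat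
decreasing_by
  · have h1 : PySem.Int.floordiv (lo + hi) 2 < hi := by
      rw [PySem.Int.floordiv_lt_iff_lt_mul (by norm_num)]; omega
    omega
  · have h2 : lo ≤ PySem.Int.floordiv (lo + hi) 2 := by
      rw [PySem.Int.le_floordiv_iff_mul_le (by norm_num)]; omega
    omega

def get_initial_array_alt (goal : Int) : List Int × Int :=
  let lo := bLoop goal 0 (max goal 0)
  (PySem.List.pyRange 1 (lo + 1) 1, PySem.Int.floordiv (lo * (lo + 1)) 2)

-- ===== PRECONDITION & SPEC =====
def Spec_get_initial_array (goal : Int) (out : List Int × Int) : Prop := out = get_initial_array_alt goal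
instance (goal : Int) (out : List Int × Int) : Decidable (Spec_get_initial_array goal out) := by unfold Spec_get_initial_array; infer_instance

-- ===== CLAIM (what is proved, stated in full; the proofs are below) =====
def Claim_equal_get_initial_array : Prop := ∀ (goal : Int), Dom_get_initial_array goal → Spec_get_initial_array goal (get_initial_array goal)

-- ===== LEMMAS AND PROOFS =====

-- the triangular sum
def triSum (n : Int) : Int := PySem.Int.floordiv (n * (n + 1)) 2

lemma triSum_succ (n : Int) : triSum (n + 1) = triSum n + (n + 1) := by
  unfold triSum
  rw [PySem.Int.floordiv_eq_ediv_of_pos (by norm_num), PySem.Int.floordiv_eq_ediv_of_pos (by norm_num)]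
  have h : (n + 1) * (n + 1 + 1) = n * (n + 1) + (n + 1) * 2 := by ring
  rw [h, Int.add_mul_ediv_right _ _ (by norm_num)]

lemma triSum_mono {a b : Int} (ha : 0 ≤ a) (hab : a ≤ b) : triSum a ≤ triSum b := by
  unfold triSum
  rw [PySem.Int.floordiv_eq_ediv_of_pos (by norm_num), PySem.Int.floordiv_eq_ediv_of_pos (by norm_num)]
  exact Int.ediv_le_ediv (by norm_num) (by nlinarith)

lemma triSum_ge_self {g : Int} (hg : 0 ≤ g) : g ≤ triSum g := by
  unfold triSum
  rw [PySem.Int.le_floordiv_iff_mul_le (by norm_num)]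
  rcases (by omega : g = 0 ∨ 1 ≤ g) with h | h
  · subst h; norm_num
  · nlinarith

lemma aLoop_char (goal : Int) (n : Nat) (hub : goal ≤ triSum n)
    (hmin : ∀ m : Nat, m < n → triSum m < goal) :
    ∀ (k : Nat) (hp : (1 : Int) ≤ (k : Int) + 1), k ≤ n →
      aLoop goal ((k : Int) + 1) (triSum k) (PySem.List.pyRange 1 ((k : Int) + 1) 1) hp
        = (PySem.List.pyRange 1 ((n : Int) + 1) 1, triSum n) := by
  intro k hp hkn
  induction hd : n - k generalizing k with
  | zero =>
    have hk : k = n := by omega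
    subst hk
    rw [aLoop, dif_neg (by omega)]
  | succ d ih =>
    have hkn' : k < n := by omega
    have hlt : triSum k < goal := hmin k hkn'
    rw [aLoop, dif_pos hlt]
    have e1 : ((k : Int) + 1) + 1 = ((k + 1 : Nat) : Int) + 1 := by push_cast; ring
    have e2 : triSum k + ((k : Int) + 1) = triSum ((k + 1 : Nat) : Int) := by
      push_cast; rw [triSum_succ]
    have e3 : PySem.List.pyRange 1 ((k : Int) + 1) 1 ++ [(k : Int) + 1]
        = PySem.List.pyRange 1 (((k + 1 : Nat) : Int) + 1) 1 := by
      push_cast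
      exact (PySem.List.pyRange_one_succ_right (by omega)).symm
    simp only [e2, e3]
    have := ih (k + 1) (by push_cast; omega) (by omega) (by omega)
    rw [← this]
    congr 1

lemma bLoop_char (goal lo hi : Int) (h0 : 0 ≤ lo) (hle : lo ≤ hi)
    (hlow : ∀ m : Int, 0 ≤ m → m < lo → triSum m < goal) (hhigh : goal ≤ triSum hi) :
    0 ≤ bLoop goal lo hi ∧ goal ≤ triSum (bLoop goal lo hi) ∧
      ∀ m : Int, 0 ≤ m → m < bLoop goal lo hi → triSum m < goal := by
  by_cases h : lo < hi
  · rw [bLoop, dif_pos h]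
    have hmid1 : lo ≤ PySem.Int.floordiv (lo + hi) 2 := by
      rw [PySem.Int.le_floordiv_iff_mul_le (by norm_num)]; omega
    have hmid2 : PySem.Int.floordiv (lo + hi) 2 < hi := by
      rw [PySem.Int.floordiv_lt_iff_lt_mul (by norm_num)]; omega
    by_cases hb : PySem.Int.floordiv
        (PySem.Int.floordiv (lo + hi) 2 * (PySem.Int.floordiv (lo + hi) 2 + 1)) 2 ≥ goal
    · rw [if_pos hb]
      exact bLoop_char goal lo (PySem.Int.floordiv (lo + hi) 2) h0 hmid1 hlow hb
    · rw [if_neg hb]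
      refine bLoop_char goal (PySem.Int.floordiv (lo + hi) 2 + 1) hi (by omega) (by omega) ?_ hhigh
      intro m hm0 hmlt
      by_cases hmlo : m < lo
      · exact hlow m hm0 hmlo
      · have : triSum m ≤ triSum (PySem.Int.floordiv (lo + hi) 2) :=
          triSum_mono hm0 (by omega)
        have hb' : triSum (PySem.Int.floordiv (lo + hi) 2) < goal := by
          unfold triSum; omega
        omega
  · rw [bLoop, dif_neg h]
    have : lo = hi := by omega
    exact ⟨h0, by rw [this]; exact hhigh, hlow⟩
termination_by (hi - lo).toNat
decreasing_by
  · omega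
  · omega

lemma triSum_zero : triSum 0 = 0 := by decide

-- ===== VERDICT (by name: the statement is the Claim_ definition above) =====
theorem get_initial_array_spec : Claim_equal_get_initial_array := by
  intro goal _
  unfold Spec_get_initial_array
  -- the least Nat n with goal ≤ triSum n
  have hP : ∃ k : Nat, goal ≤ triSum (k : Int) := by
    refine ⟨goal.toNat, ?_⟩
    have h1 : goal ≤ (goal.toNat : Int) := Int.self_le_toNat goal
    exact le_trans h1 (triSum_ge_self (by positivity))
  set N : Nat := Nat.find hP with hN
  have hub : goal ≤ triSum (N : Int) := Nat.find_spec hP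
  have hmin : ∀ m : Nat, m < N → triSum (m : Int) < goal := by
    intro m hm
    have := Nat.find_min hP hm
    omega
  -- A's value
  have hA : get_initial_array goal = (PySem.List.pyRange 1 ((N : Int) + 1) 1, triSum N) := by
    have h0 := aLoop_char goal N hub hmin 0 (by norm_num) (Nat.zero_le _)
    simp only [Nat.cast_zero, zero_add, triSum_zero] at h0
    rw [PySem.List.pyRange_one_eq_nil (le_refl (1 : Int))] at h0
    exact h0
  -- B's value
  have hhigh : goal ≤ triSum (max goal 0) := by
    rcases le_total goal 0 with hg | hg
    · have : max goal 0 = 0 := by omega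
      rw [this, triSum_zero]; omega
    · have : max goal 0 = goal := by omega
      rw [this]; exact triSum_ge_self hg
  obtain ⟨hr0, hrge, hrmin⟩ :=
    bLoop_char goal 0 (max goal 0) le_rfl (by omega) (by omega) hhigh
  set r : Int := bLoop goal 0 (max goal 0) with hr
  have hrN : r = (N : Int) := by
    have h1 : r ≤ (N : Int) := by
      by_contra hc
      have : triSum (N : Int) < goal := hrmin N (by positivity) (by omega)
      omega
    have h2 : (N : Int) ≤ r := by
      have hrt : ((r.toNat : Nat) : Int) = r := Int.toNat_of_nonneg hr0
      have : goal ≤ triSum ((r.toNat : Nat) : Int) := by rw [hrt]; exact hrge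
      have := Nat.find_min' hP this
      omega
    omega
  rw [hA]
  show _ = (PySem.List.pyRange 1 (r + 1) 1, PySem.Int.floordiv (r * (r + 1)) 2)
  rw [hrN]
  rfl
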